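-- pv_equiv track=rewrite | github.com/ghastcmd/evolutionary-computing | exercises/2 DNA sequencing/__main__.py | is_monster
-- ===== SOURCE A (Python) =====
-- def is_monster(dna_string, original_dna_list, pos):
--     index = 0
--     for val in original_dna_list[pos]:
--         while dna_string[index] == 'X':
--             index += 1
--         if val != dna_string[index]:
--             return True
--         index += 1
--
--     return False
-- ===== SOURCE B (Python) =====
-- def is_monster(dna_string, original_dna_list, pos):
--     filtered = [c for c in dna_string if c != 'X']
--     ref = original_dna_list[pos]
--     for i in range(len(ref)):
--         if ref[i] != filtered[i]:
--             return True
--     return False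
-- ===== Notes on version B (the rewrite author's own statement) =====
-- stated objective: idiomatic
-- what changed: B pre-filters the non-'X' characters of dna_string in one pass and then compares the reference positionally by index, replacing A's threaded index with an inner while-skip loop; explicit indexing of the filtered list preserves the IndexError when the reference outlasts the non-X characters.
import Mathlib
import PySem

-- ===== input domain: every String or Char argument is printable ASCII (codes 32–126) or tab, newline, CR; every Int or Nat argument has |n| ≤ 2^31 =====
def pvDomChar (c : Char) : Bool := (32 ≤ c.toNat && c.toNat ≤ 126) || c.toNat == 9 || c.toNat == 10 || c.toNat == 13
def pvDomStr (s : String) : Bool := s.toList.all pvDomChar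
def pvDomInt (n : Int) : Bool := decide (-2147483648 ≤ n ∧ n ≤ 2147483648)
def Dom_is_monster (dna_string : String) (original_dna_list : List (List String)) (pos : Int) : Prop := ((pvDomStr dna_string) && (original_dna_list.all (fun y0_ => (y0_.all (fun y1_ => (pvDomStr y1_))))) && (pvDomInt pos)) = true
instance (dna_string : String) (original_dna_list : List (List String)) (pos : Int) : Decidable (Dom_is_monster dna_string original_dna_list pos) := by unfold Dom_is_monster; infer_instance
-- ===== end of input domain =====

-- B pre-filters the non-'X' characters once and compares the reference positionally by index
-- (idiomatic decomposition; same cost); A and B raise on the same inputs, excluded by Pre_.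


-- ===== PORT A =====
-- 'while dna_string[index] == 'X': index += 1' followed by the read of dna_string[index]:
-- returns the first non-'X' character at position ≥ index with its position; none = IndexError.
def pvASkip (cs : List Char) (index : Nat) : Option (Char × Nat) :=
  if h : index < cs.length then
    if cs[index] = 'X' then pvASkip cs (index + 1) else some (cs[index], index)
  else none
termination_by cs.length - index

-- the 'for val in original_dna_list[pos]' loop; none = IndexError escaping the loop.
def pvALoop (refList : List String) (cs : List Char) (index : Nat) : Option Bool :=
  match refList with
  | [] => some false
  | val :: rest =>
    match pvASkip cs index with
    | none => none
    | some (c, j) =>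
      if val ≠ String.ofList [c] then some true
      else pvALoop rest cs (j + 1)

def is_monster (dna_string : String) (original_dna_list : List (List String)) (pos : Int) : Bool :=
  match PySem.List.pyGet? original_dna_list pos with
  | none => false      -- IndexError on original_dna_list[pos]; outside Pre_
  | some ref => (pvALoop ref dna_string.toList 0).getD false   -- .getD false: none = IndexError, outside Pre_

-- ===== PORT B =====
-- 'for i in range(len(ref))' with filtered[i]; none = IndexError on filtered[i].
def pvBLoop (refList : List String) (fs : List Char) (i : Nat) : Option Bool :=
  if h : i < refList.length then
    match fs[i]? with
    | none => none
    | some c => if refList[i] ≠ String.ofList [c] then some true else pvBLoop refList fs (i + 1)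
  else some false
termination_by refList.length - i

def is_monster_alt (dna_string : String) (original_dna_list : List (List String)) (pos : Int) : Bool :=
  let filtered := dna_string.toList.filter (fun c => c ≠ 'X')
  match PySem.List.pyGet? original_dna_list pos with
  | none => false      -- IndexError on original_dna_list[pos]; outside Pre_
  | some ref => (pvBLoop ref filtered 0).getD false

-- ===== PRECONDITION & SPEC =====
-- Exactly the inputs on which the Python A returns: pos is a valid index, and either the
-- reference fits inside the non-'X' characters of dna_string or a mismatch occurs before
-- they run out (A — and B — raise IndexError otherwise).
def Pre_is_monster (dna_string : String) (original_dna_list : List (List String)) (pos : Int) : Prop :=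
  match PySem.List.pyGet? original_dna_list pos with
  | none => False
  | some ref =>
    ref.length ≤ (dna_string.toList.filter (fun c => c ≠ 'X')).length ∨
      ∃ i ∈ List.range (dna_string.toList.filter (fun c => c ≠ 'X')).length,
        i < ref.length ∧ ref[i]! ≠ String.ofList [(dna_string.toList.filter (fun c => c ≠ 'X'))[i]!]
instance (dna_string : String) (original_dna_list : List (List String)) (pos : Int) : Decidable (Pre_is_monster dna_string original_dna_list pos) := by
  unfold Pre_is_monster
  cases PySem.List.pyGet? original_dna_list pos <;> infer_instance

def pvWitness_is_monster : String × List (List String) × Int := ("AXGT", [["A", "G"], ["C"]], 0)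

def Spec_is_monster (dna_string : String) (original_dna_list : List (List String)) (pos : Int) (out : Bool) : Prop := out = is_monster_alt dna_string original_dna_list pos
instance (dna_string : String) (original_dna_list : List (List String)) (pos : Int) (out : Bool) : Decidable (Spec_is_monster dna_string original_dna_list pos out) := by unfold Spec_is_monster; infer_instance

-- ===== CLAIM (what is proved, stated in full; the proofs are below) =====
def Claim_equal_is_monster : Prop := ∀ (dna_string : String) (original_dna_list : List (List String)) (pos : Int), Dom_is_monster dna_string original_dna_list pos → Pre_is_monster dna_string original_dna_list pos → Spec_is_monster dna_string original_dna_list pos (is_monster dna_string original_dna_list pos)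

-- ===== LEMMAS AND PROOFS =====

-- proof-only reference recursion: consume the reference and the filtered characters together.
def pvG : List String → List Char → Option Bool
  | [], _ => some false
  | _ :: _, [] => none
  | v :: rest, c :: fs => if v ≠ String.ofList [c] then some true else pvG rest fs

theorem pvASkip_filter (cs : List Char) (index : Nat) :
    (cs.drop index).filter (fun c => c ≠ 'X') =
      match pvASkip cs index with
      | none => []
      | some (c, j) => c :: (cs.drop (j + 1)).filter (fun c => c ≠ 'X') := by
  fun_induction pvASkip cs index with
  | case1 index h hx ih =>
    rw [List.drop_eq_getElem_cons h, List.filter_cons]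
    simpa [hx] using ih
  | case2 index h hx =>
    rw [List.drop_eq_getElem_cons h, List.filter_cons]
    simp [hx]
  | case3 index h =>
    simp [List.drop_eq_nil_of_le (Nat.le_of_not_lt h)]

theorem pvALoop_eq_g (refList : List String) (cs : List Char) (index : Nat) :
    pvALoop refList cs index = pvG refList ((cs.drop index).filter (fun c => c ≠ 'X')) := by
  induction refList generalizing index with
  | nil => cases h : (cs.drop index).filter (fun c => c ≠ 'X') <;> simp [pvALoop, pvG]
  | cons v rest ih =>
    rw [pvASkip_filter cs index]
    cases h : pvASkip cs index with
    | none => simp [pvALoop, pvG, h]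
    | some cj =>
      obtain ⟨c, j⟩ := cj
      by_cases hv : v ≠ String.ofList [c] <;> simp [pvALoop, pvG, h, hv, ih]

theorem pvBLoop_eq_g (refList : List String) (fs : List Char) (i : Nat) :
    pvBLoop refList fs i = pvG (refList.drop i) (fs.drop i) := by
  fun_induction pvBLoop refList fs i with
  | case1 i h hc =>
    have hle : fs.length ≤ i := by
      by_contra hlt
      exact absurd (List.getElem?_eq_getElem (Nat.lt_of_not_le hlt)) (by simp [hc])
    rw [List.drop_eq_getElem_cons h, List.drop_eq_nil_of_le hle]
    simp only [pvG]
  | case2 i h c hc hv =>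
    obtain ⟨hlt, hfi⟩ := List.getElem?_eq_some_iff.mp hc
    rw [List.drop_eq_getElem_cons h, List.drop_eq_getElem_cons hlt]
    simp only [pvG]
    simp [hfi, hv]
  | case3 i h c hc hv ih =>
    obtain ⟨hlt, hfi⟩ := List.getElem?_eq_some_iff.mp hc
    rw [List.drop_eq_getElem_cons h, List.drop_eq_getElem_cons hlt, ih]
    simp only [pvG]
    simp [hfi, hv]
  | case4 i h =>
    rw [List.drop_eq_nil_of_le (Nat.le_of_not_lt h)]
    simp only [pvG]

-- the two ports compute the same Option Bool on every input
theorem ports_eq (dna_string : String) (original_dna_list : List (List String)) (pos : Int) :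
    is_monster dna_string original_dna_list pos = is_monster_alt dna_string original_dna_list pos := by
  unfold is_monster is_monster_alt
  cases PySem.List.pyGet? original_dna_list pos with
  | none => rfl
  | some ref =>
    simp only [pvALoop_eq_g, pvBLoop_eq_g, List.drop_zero]

-- ===== VERDICT (by name: the statement is the Claim_ definition above) =====
theorem is_monster_spec : Claim_equal_is_monster := by
  intro dna_string original_dna_list pos _ _
  unfold Spec_is_monster
  exact ports_eq dna_string original_dna_list pos
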